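-- pv_equiv track=rewrite | github.com/ptaylor2018/AoC2020 | day20/small_day20.py | place_square
-- ===== SOURCE A (Python) =====
-- def place_square(image: list, loc: tuple, arr: list) -> list:
--     image_stripped = []
--     for row in image:
--         image_stripped.append(row[1:-1])
--     image_stripped = image_stripped[1:-1]
--
--     for i, row in enumerate(image_stripped):
--         for j, char in enumerate(row):
--             arr[loc[0]+i][loc[1]+j] = char
--     return arr
-- ===== SOURCE B (Python) =====
-- def place_square(image: list, loc: tuple, arr: list) -> list:
--     # Destination-driven gather: for each cell of arr, decide whether it lies in
--     # the target window and, if so, fetch the corresponding interior character of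
--     # image; no stripped copy and no scatter of writes. Mutates arr rows in place
--     # like A does.
--     h = len(image)
--     for r, row in enumerate(arr):
--         i = r - loc[0] + 1
--         if 1 <= i < h - 1:
--             src = image[i]
--             w = len(src)
--             for c in range(len(row)):
--                 j = c - loc[1] + 1
--                 if 1 <= j < w - 1:
--                     row[c] = src[j]
--     return arr
-- ===== Notes on version B (the rewrite author's own statement) =====
-- stated objective: alternative
-- what changed: B inverts the traversal: instead of A's scatter (stripping image and writing each interior character out into arr), B walks the destination arr row by row and cell by cell and gathers the matching interior character of image by offset arithmetic, skipping cells outside the window.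
-- outside the precondition, e.g. on place_square(['aaa', 'abc', 'aaa'], (0, -1), [['x', 'y']]): A returns [['x', 'b']], B returns [['x', 'y']]
import Mathlib
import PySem

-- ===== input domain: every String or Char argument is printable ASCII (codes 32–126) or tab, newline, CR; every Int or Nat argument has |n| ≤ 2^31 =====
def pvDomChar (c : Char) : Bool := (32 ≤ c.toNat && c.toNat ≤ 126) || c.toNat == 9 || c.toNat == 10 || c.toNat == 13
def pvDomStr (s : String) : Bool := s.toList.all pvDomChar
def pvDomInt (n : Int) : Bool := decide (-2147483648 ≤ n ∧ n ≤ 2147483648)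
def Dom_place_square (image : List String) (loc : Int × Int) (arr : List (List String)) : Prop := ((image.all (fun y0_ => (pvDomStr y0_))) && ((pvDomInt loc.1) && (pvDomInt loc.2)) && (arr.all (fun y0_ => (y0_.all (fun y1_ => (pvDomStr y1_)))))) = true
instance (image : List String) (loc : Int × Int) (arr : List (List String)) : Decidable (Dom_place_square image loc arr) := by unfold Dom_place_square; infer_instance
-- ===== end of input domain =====

-- B inverts the traversal: A scatters the stripped interior of `image` into `arr`;
-- B walks the destination `arr` and gathers each cell's character from `image` by
-- offset arithmetic (objective: alternative). Both Pythons mutate `arr` in place;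
-- the equivalence proved here is about the return value.

-- 'arr[x][y] = v' (the Python assignment statement); total form, in range under Pre_
def pvAssign (a : List (List String)) (x y : Int) (v : String) : List (List String) :=
  PySem.List.pySetD a x (PySem.List.pySetD (PySem.List.pyGetD a x []) y v)

-- ===== PORT A =====
def place_square (image : List String) (loc : Int × Int) (arr : List (List String)) : List (List String) :=
  let image_stripped0 : List (List Char) :=
    image.foldl (fun acc row => acc ++ [PySem.List.slice row.toList (some 1) (some (-1))]) []
  let image_stripped : List (List Char) := PySem.List.slice image_stripped0 (some 1) (some (-1))
  (PySem.List.enumerate image_stripped 0).foldl (fun a p =>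
    (PySem.List.enumerate p.2 0).foldl (fun a2 q =>
      pvAssign a2 (loc.1 + p.1) (loc.2 + q.1) (String.ofList [q.2])) a) arr

-- ===== PORT B =====
def place_square_alt (image : List String) (loc : Int × Int) (arr : List (List String)) : List (List String) :=
  let h : Int := (image.length : Int)
  (PySem.List.enumerate arr 0).map (fun p =>
    let r := p.1
    let row := p.2
    let i := r - loc.1 + 1
    if 1 ≤ i ∧ i < h - 1 then
      let src : List Char := (PySem.List.pyGetD image i "").toList
      let w : Int := (src.length : Int)
      (PySem.List.pyRange 0 (row.length : Int) 1).foldl (fun row2 c =>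
        let j := c - loc.2 + 1
        if 1 ≤ j ∧ j < w - 1 then
          PySem.List.pySetD row2 c (String.ofList [PySem.List.pyGetD src j ' '])
        else row2) row
    else row)

-- ===== PRECONDITION & SPEC =====
-- Pre_ excludes (a) inputs on which the Python A raises IndexError (an interior cell of `image`
-- would be written outside `arr`'s Python index range), and (b) inputs where some write index
-- loc.1+i or loc.2+j is negative: there A returns a grid with characters placed at wrapped
-- positions near the end of arr (Python negative-index wraparound) while B leaves those cells
-- unchanged — a corner no caller of a tile-placing routine specifies (excluded examples in cites).
def Pre_place_square (image : List String) (loc : Int × Int) (arr : List (List String)) : Prop :=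
  ∀ k < image.length - 2, ∀ j < ((image.getD (k+1) "").toList.length - 2),
    0 ≤ loc.1 + k ∧ PySem.Raise.InRange arr.length (loc.1 + k) ∧
    0 ≤ loc.2 + j ∧ PySem.Raise.InRange (PySem.List.pyGetD arr (loc.1 + k) []).length (loc.2 + j)
instance (image : List String) (loc : Int × Int) (arr : List (List String)) : Decidable (Pre_place_square image loc arr) := by unfold Pre_place_square; infer_instance

def pvWitness_place_square : List String × (Int × Int) × List (List String) :=
  (["aaa", "aba", "aaa"], (0, 0), [["x"]])

def Spec_place_square (image : List String) (loc : Int × Int) (arr : List (List String)) (out : List (List String)) : Prop := out = place_square_alt image loc arr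
instance (image : List String) (loc : Int × Int) (arr : List (List String)) (out : List (List String)) : Decidable (Spec_place_square image loc arr out) := by unfold Spec_place_square; infer_instance

-- ===== CLAIM (what is proved, stated in full; the proofs are below) =====
def Claim_equal_place_square : Prop := ∀ (image : List String) (loc : Int × Int) (arr : List (List String)), Dom_place_square image loc arr → Pre_place_square image loc arr → Spec_place_square image loc arr (place_square image loc arr)

-- ===== LEMMAS AND PROOFS =====

-- the sequence of writes (x, y, v) that A performs, in order
def pvWrites (image : List String) (loc : Int × Int) : List (Int × Int × String) :=
  (List.range (image.length - 2)).flatMap (fun (k : Nat) =>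
    (List.range ((image.getD (k+1) "").toList.length - 2)).map (fun (j : Nat) =>
      ((loc.1 + (k : Int), loc.2 + (j : Int), String.ofList [(image.getD (k+1) "").toList.getD (j+1) ' ']))))

def pvStep (a : List (List String)) (t : Int × Int × String) : List (List String) :=
  pvAssign a t.1 t.2.1 t.2.2

theorem pv_slice11 {α : Type} (xs : List α) :
    PySem.List.slice xs (some 1) (some (-1)) = xs.tail.dropLast := by
  cases xs with
  | nil => simp [PySem.List.slice]
  | cons a l =>
    simp only [PySem.List.slice, Int.reduceNeg, Order.lt_one_iff, PySem.List.clampIdx_neg_ofNat,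
      zero_le_one, PySem.List.clampIdx_of_nonneg, Int.toNat_one]
    simp [List.dropLast_eq_take]

theorem pv_enum_range {α : Type} (xs : List α) (d : α) :
    PySem.List.enumerate xs 0
      = (List.range xs.length).map (fun (k : Nat) => ((k : Int), PySem.List.pyGetD xs (k : Int) d)) := by
  rw [PySem.List.enumerate_eq_map_pyRange xs d, PySem.List.len_eq,
    PySem.List.pyRange_zero_natCast, List.map_map]
  rfl

theorem pv_getD_mid {α : Type} (l : List α) (d : α) (k : Nat) (hk : k < l.length - 2) :
    l.tail.dropLast.getD k d = l.getD (k+1) d := by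
  have h1 : k < l.tail.dropLast.length := by
    simp only [List.length_dropLast, List.length_tail]; omega
  have h2 : k + 1 < l.length := by omega
  rw [List.getD_eq_getElem _ _ h1, List.getElem_dropLast, List.getElem_tail,
    List.getD_eq_getElem _ _ h2]

theorem pv_A_writes (image : List String) (loc : Int × Int) (arr : List (List String)) :
    place_square image loc arr = (pvWrites image loc).foldl pvStep arr := by
  unfold place_square pvWrites
  simp only [PySem.List.foldl_append_singleton_eq_map, List.nil_append, pv_slice11,
    ← List.map_tail, ← List.map_dropLast]
  rw [pv_enum_range _ ([] : List Char), List.foldl_map, List.foldl_flatMap]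
  have hlen : (image.tail.dropLast.map (fun row => row.toList.tail.dropLast)).length
      = image.length - 2 := by
    simp only [List.length_map, List.length_dropLast, List.length_tail, Nat.sub_sub]
  rw [hlen]
  apply PySem.List.foldl_congr_mem
  intro a k hk
  have hk2 : k < image.length - 2 := List.mem_range.mp hk
  have hrow : PySem.List.pyGetD
      (image.tail.dropLast.map (fun row => row.toList.tail.dropLast)) (k : Int) []
      = (image.getD (k+1) "").toList.tail.dropLast := by
    rw [PySem.List.pyGetD_natCast]
    have h1 : k < (image.tail.dropLast.map (fun row => row.toList.tail.dropLast)).length := by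
      rw [hlen]; exact hk2
    rw [List.getD_eq_getElem _ _ h1, List.getElem_map]
    have h3 : k < image.tail.dropLast.length := by
      simp only [List.length_dropLast, List.length_tail]; omega
    have := pv_getD_mid image "" k hk2
    rw [List.getD_eq_getElem _ _ h3] at this
    rw [this]
  rw [hrow, List.foldl_map]
  rw [pv_enum_range _ ' ', List.foldl_map]
  have hclen : (image.getD (k+1) "").toList.tail.dropLast.length
      = (image.getD (k+1) "").toList.length - 2 := by
    simp only [List.length_dropLast, List.length_tail, Nat.sub_sub]
  rw [hclen]
  apply PySem.List.foldl_congr_mem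
  intro a2 j hj
  have hj2 : j < (image.getD (k+1) "").toList.length - 2 := List.mem_range.mp hj
  have hchar : PySem.List.pyGetD (image.getD (k+1) "").toList.tail.dropLast (j : Int) ' '
      = (image.getD (k+1) "").toList.getD (j+1) ' ' := by
    rw [PySem.List.pyGetD_natCast, pv_getD_mid _ _ _ hj2]
  rw [hchar]
  rfl


-- abbreviations for A's interior rows/widths/characters (proof-only)
def pvSrc (image : List String) (k : Nat) : List Char := (image.getD (k+1) "").toList
def pvM (image : List String) (k : Nat) : Nat := (pvSrc image k).length - 2
def pvV (image : List String) (k j : Nat) : String := String.ofList [(pvSrc image k).getD (j+1) ' ']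
-- the per-row update both programs perform on a destination row
def pvInner (image : List String) (loc2 : Int) (k : Nat) (row : List String) : List String :=
  (List.range (pvM image k)).foldl
    (fun row2 (j : Nat) => PySem.List.pySetD row2 (loc2 + (j : Int)) (pvV image k j)) row
-- the effect of the first n write groups, described row by row
def pvG (image : List String) (loc : Int × Int) (n : Nat) (r : Nat) (row : List String) : List String :=
  if loc.1 ≤ (r : Int) ∧ (r : Int) < loc.1 + n then
    pvInner image loc.2 (((r : Int) - loc.1).toNat) row
  else row

theorem pv_foldl_id {alpha beta : Type} (l : List beta) (init : alpha) :
    l.foldl (fun a _ => a) init = init := by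
  induction l generalizing init with
  | nil => rfl
  | cons x xs ih => simpa using ih init

theorem pv_foldl_guard {alpha beta : Type} (p : beta → Prop) [DecidablePred p]
    (f : alpha → beta → alpha) (l : List beta) (init : alpha) :
    l.foldl (fun a x => if p x then f a x else a) init
      = (l.filter (fun x => decide (p x))).foldl f init := by
  induction l generalizing init with
  | nil => rfl
  | cons x xs ih =>
    by_cases h : p x <;> simp [h, ih]

theorem pv_filter_range (L b M : Nat) (h : b + M ≤ L) :
    (List.range L).filter (fun c => decide (b ≤ c ∧ c < b + M))
      = (List.range M).map (fun j => b + j) := by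
  obtain ⟨t, rfl⟩ : ∃ t, L = (b + M) + t := ⟨L - (b + M), by omega⟩
  rw [List.range_add, List.range_add, List.filter_append, List.filter_append]
  have h1 : (List.range b).filter (fun c => decide (b ≤ c ∧ c < b + M)) = [] := by
    apply List.filter_eq_nil_iff.mpr
    intro x hx
    have := List.mem_range.mp hx
    simp only [decide_eq_true_eq]
    omega
  have h2 : ((List.range M).map (fun j => b + j)).filter
      (fun c => decide (b ≤ c ∧ c < b + M)) = (List.range M).map (fun j => b + j) := by
    apply List.filter_eq_self.mpr
    intro x hx
    obtain ⟨j, hj, rfl⟩ := List.mem_map.mp hx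
    have := List.mem_range.mp hj
    simp only [decide_eq_true_eq]
    omega
  have h3 : ((List.range t).map (fun j => b + M + j)).filter
      (fun c => decide (b ≤ c ∧ c < b + M)) = [] := by
    apply List.filter_eq_nil_iff.mpr
    intro x hx
    obtain ⟨j, hj, rfl⟩ := List.mem_map.mp hx
    simp only [decide_eq_true_eq]
    omega
  rw [h1, h2, h3, List.nil_append, List.append_nil]

-- a run of writes into one and the same row of `a` collapses to a single row update
theorem pv_rowcollapse (y : Nat → Int) (v : Nat → String) (a : List (List String))
    (xN : Nat) (hx : xN < a.length) (M : Nat) :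
    (List.range M).foldl (fun b j => pvAssign b (xN : Int) (y j) (v j)) a
      = a.set xN ((List.range M).foldl
          (fun row j => PySem.List.pySetD row (y j) (v j)) (a[xN]'hx)) := by
  induction M with
  | zero => simp [List.set_getElem_self hx]
  | succ m ih =>
    rw [List.range_succ, List.foldl_append, List.foldl_append, ih]
    simp only [List.foldl_cons, List.foldl_nil]
    unfold pvAssign
    have hx2 : xN < (a.set xN ((List.range m).foldl
        (fun row j => PySem.List.pySetD row (y j) (v j)) (a[xN]'hx))).length := by
      simpa using hx
    have h1 : PySem.List.pyGetD (a.set xN ((List.range m).foldl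
        (fun row j => PySem.List.pySetD row (y j) (v j)) (a[xN]'hx))) (xN : Int) []
        = (List.range m).foldl (fun row j => PySem.List.pySetD row (y j) (v j)) (a[xN]'hx) := by
      rw [PySem.List.pyGetD_natCast, List.getD_eq_getElem _ _ hx2]
      exact List.getElem_set_self hx2
    rw [h1, PySem.List.pySetD_natCast, List.set_set]

-- the guarded one-pass over a destination row equals the window update
theorem pv_window (src : List Char) (loc2 : Int) (row : List String)
    (hin : ∀ j < src.length - 2, 0 ≤ loc2 + j ∧ loc2 + j < (row.length : Int)) :
    (PySem.List.pyRange 0 (row.length : Int) 1).foldl (fun row2 c =>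
        if 1 ≤ c - loc2 + 1 ∧ c - loc2 + 1 < (src.length : Int) - 1 then
          PySem.List.pySetD row2 c (String.ofList [PySem.List.pyGetD src (c - loc2 + 1) ' '])
        else row2) row
      = (List.range (src.length - 2)).foldl
          (fun row2 (j : Nat) => PySem.List.pySetD row2 (loc2 + (j : Int))
            (String.ofList [src.getD (j+1) ' '])) row := by
  by_cases hM : src.length - 2 = 0
  · rw [hM]
    simp only [List.range_zero, List.foldl_nil]
    refine Eq.trans (PySem.List.foldl_congr_mem _ _ _ _ ?_) (pv_foldl_id _ row)
    intro acc c _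
    rw [if_neg]
    omega
  · have hM' : 0 < src.length - 2 := Nat.pos_of_ne_zero hM
    have hb0 : 0 ≤ loc2 := by have := (hin 0 hM').1; omega
    have hbM : (loc2.toNat) + (src.length - 2) ≤ row.length := by
      have := (hin (src.length - 2 - 1) (by omega)).2
      omega
    rw [PySem.List.pyRange_zero_natCast, List.foldl_map]
    refine Eq.trans (PySem.List.foldl_congr_mem (g := fun row2 (c : Nat) =>
      if loc2.toNat ≤ c ∧ c < loc2.toNat + (src.length - 2) then
        PySem.List.pySetD row2 (c : Int)
          (String.ofList [PySem.List.pyGetD src ((c : Int) - loc2 + 1) ' '])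
      else row2) _ _ _ ?_) ?_
    · intro acc c _
      by_cases hg : loc2.toNat ≤ c ∧ c < loc2.toNat + (src.length - 2)
      · rw [if_pos (by omega)]
        exact (if_pos hg).symm
      · rw [if_neg (by omega)]
        exact (if_neg hg).symm
    · rw [pv_foldl_guard, pv_filter_range row.length loc2.toNat (src.length - 2) hbM,
        List.foldl_map]
      apply PySem.List.foldl_congr_mem
      intro a j hj
      have hj' : j < src.length - 2 := List.mem_range.mp hj
      have hc1 : ((loc2.toNat + j : Nat) : Int) = loc2 + (j : Int) := by push_cast; omega
      have hc2 : loc2 + (j : Int) - loc2 + 1 = ((j + 1 : Nat) : Int) := by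
        push_cast; omega
      rw [hc1, hc2, PySem.List.pyGetD_natCast]

-- the first n write groups of the scatter, applied in order, act row-wise
theorem pv_scatter (image : List String) (loc : Int × Int) (arr : List (List String))
    (hpre : Pre_place_square image loc arr)
    (hnd' : ∀ k < image.length - 2, ∀ j < pvM image k, 0 ≤ loc.1 + k ∧ 0 ≤ loc.2 + j) :
    ∀ n, n ≤ image.length - 2 →
    (List.range n).foldl (fun a (k : Nat) => (List.range (pvM image k)).foldl
        (fun a2 (j : Nat) => pvAssign a2 (loc.1 + (k : Int)) (loc.2 + (j : Int)) (pvV image k j)) a) arr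
      = arr.mapIdx (pvG image loc n) := by
  intro n
  induction n with
  | zero =>
    intro _
    simp only [List.range_zero, List.foldl_nil]
    apply List.ext_getElem (by simp)
    intro r h1 h2
    rw [List.getElem_mapIdx]
    unfold pvG
    rw [if_neg (by push_cast; omega)]
  | succ n ih =>
    intro h
    rw [List.range_succ, List.foldl_append, ih (by omega)]
    simp only [List.foldl_cons, List.foldl_nil]
    by_cases hMn : pvM image n = 0
    · rw [hMn]
      simp only [List.range_zero, List.foldl_nil]
      apply List.ext_getElem (by simp)
      intro r h1 h2
      simp only [List.getElem_mapIdx]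
      unfold pvG
      by_cases hg : loc.1 ≤ (r : Int) ∧ (r : Int) < loc.1 + n
      · rw [if_pos hg, if_pos (by push_cast at hg ⊢; omega)]
      · by_cases hg2 : loc.1 ≤ (r : Int) ∧ (r : Int) < loc.1 + ((n + 1 : Nat) : Int)
        · rw [if_neg hg, if_pos hg2]
          have hk : ((r : Int) - loc.1).toNat = n := by push_cast at hg hg2 ⊢; omega
          rw [hk]
          unfold pvInner
          rw [hMn]
          simp
        · rw [if_neg hg, if_neg hg2]
    · have hMn' : 0 < pvM image n := Nat.pos_of_ne_zero hMn
      have hn : n < image.length - 2 := by omega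
      have h0 := hnd' n hn 0 hMn'
      have hIn := (hpre n hn 0 (by simpa [pvM, pvSrc] using hMn')).2.1
      have hx0 : 0 ≤ loc.1 + (n : Int) := by have := h0.1; omega
      have hxcast : (((loc.1 + (n : Int)).toNat : Nat) : Int) = loc.1 + n :=
        Int.toNat_of_nonneg hx0
      have hxlt : (loc.1 + (n : Int)).toNat < arr.length := by
        simp [PySem.Raise.InRange] at hIn; omega
      have hxlt' : (loc.1 + (n : Int)).toNat < (arr.mapIdx (pvG image loc n)).length := by
        simpa using hxlt
      rw [← hxcast,
        pv_rowcollapse (fun j => loc.2 + j) (pvV image n) _ _ hxlt' (pvM image n)]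
      have hgot : (arr.mapIdx (pvG image loc n))[(loc.1 + (n : Int)).toNat]'hxlt'
          = arr[(loc.1 + (n : Int)).toNat]'hxlt := by
        rw [List.getElem_mapIdx]
        unfold pvG
        rw [if_neg (by omega)]
      rw [hgot]
      apply List.ext_getElem (by simp)
      intro r h1 h2
      have h2' : r < arr.length := by simpa using h2
      by_cases hr : r = (loc.1 + (n : Int)).toNat
      · subst hr
        rw [List.getElem_set_self h1, List.getElem_mapIdx]
        unfold pvG
        rw [if_pos (by constructor <;> omega)]
        have hk : (((loc.1 + (n : Int)).toNat : Int) - loc.1).toNat = n := by omega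
        rw [hk]
        rfl
      · rw [List.getElem_set_ne (fun he => hr he.symm) (by simpa using h2'),
          List.getElem_mapIdx, List.getElem_mapIdx]
        unfold pvG
        have hri : (r : Int) ≠ loc.1 + n := by
          intro he
          apply hr
          omega
        by_cases hg : loc.1 ≤ (r : Int) ∧ (r : Int) < loc.1 + n
        · rw [if_pos hg, if_pos (by push_cast at hg ⊢; omega)]
        · rw [if_neg hg, if_neg (by push_cast at hg hri ⊢; omega)]

theorem pv_main (image : List String) (loc : Int × Int) (arr : List (List String))
    (hpre : Pre_place_square image loc arr) :
    (pvWrites image loc).foldl pvStep arr = place_square_alt image loc arr := by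
  have hnd' : ∀ k < image.length - 2, ∀ j < pvM image k, 0 ≤ loc.1 + k ∧ 0 ≤ loc.2 + j := by
    intro k hk j hj
    have h := hpre k hk j (by simpa [pvM, pvSrc] using hj)
    exact ⟨h.1, h.2.2.1⟩
  -- scatter side
  unfold pvWrites
  rw [List.foldl_flatMap]
  have hA : (List.range (image.length - 2)).foldl (fun a k =>
      ((List.range ((image.getD (k+1) "").toList.length - 2)).map (fun (j : Nat) =>
        ((loc.1 + (k : Int), loc.2 + (j : Int),
          String.ofList [(image.getD (k+1) "").toList.getD (j+1) ' '])))).foldl pvStep a) arr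
      = arr.mapIdx (pvG image loc (image.length - 2)) := by
    rw [← pv_scatter image loc arr hpre hnd' (image.length - 2) le_rfl]
    apply PySem.List.foldl_congr_mem
    intro a k _
    rw [List.foldl_map]
    rfl
  rw [hA]
  -- gather side
  unfold place_square_alt
  apply List.ext_getElem (by simp [PySem.List.length_enumerate])
  intro r h1 h2
  have h2' : r < arr.length := by simpa using h1
  rw [List.getElem_mapIdx, List.getElem_map]
  have hen : (PySem.List.enumerate arr 0)[r]'(by simpa [PySem.List.length_enumerate] using h2')
      = ((0 : Int) + r, arr[r]'h2') := PySem.List.getElem_enumerate ..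
  rw [hen]
  dsimp only
  rw [zero_add]
  unfold pvG
  by_cases hg : loc.1 ≤ (r : Int) ∧ (r : Int) < loc.1 + ((image.length - 2 : Nat) : Int)
  · rw [if_pos hg,
      if_pos (show 1 ≤ (r : Int) - loc.1 + 1 ∧ (r : Int) - loc.1 + 1 < (image.length : Int) - 1 by omega)]
    have hkK : ((r : Int) - loc.1).toNat < image.length - 2 := by omega
    have hi : (r : Int) - loc.1 + 1 = ((((r : Int) - loc.1).toNat + 1 : Nat) : Int) := by
      push_cast; omega
    rw [hi, PySem.List.pyGetD_natCast]
    have hrow : PySem.List.pyGetD arr (loc.1 + (((r : Int) - loc.1).toNat : Int)) []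
        = arr[r]'h2' := by
      rw [show loc.1 + ((((r : Int) - loc.1).toNat : Nat) : Int) = ((r : Nat) : Int) by omega,
        PySem.List.pyGetD_natCast, List.getD_eq_getElem _ _ h2']
    have hin : ∀ j < (pvSrc image (((r : Int) - loc.1).toNat)).length - 2,
        0 ≤ loc.2 + j ∧ loc.2 + j < ((arr[r]'h2').length : Int) := by
      intro j hj
      have h3 := (hnd' _ hkK j (by simpa [pvM] using hj)).2
      have h4 := (hpre _ hkK j (by simpa [pvSrc] using hj)).2.2.2
      rw [hrow] at h4
      simp [PySem.Raise.InRange] at h4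
      exact ⟨h3, by omega⟩
    have hw := pv_window (pvSrc image (((r : Int) - loc.1).toNat)) loc.2 (arr[r]'h2') hin
    unfold pvSrc at hw
    unfold pvInner pvM pvV pvSrc
    exact hw.symm
  · rw [if_neg hg, if_neg (by omega)]


-- ===== VERDICT (by name: the statement is the Claim_ definition above) =====
theorem place_square_spec : Claim_equal_place_square := by
  intro image loc arr _ hpre
  unfold Spec_place_square
  rw [pv_A_writes, pv_main image loc arr hpre]
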